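-- pv_equiv track=rewrite | github.com/AlexandreCotorobai/FP | APA1/exercicios fp/new.py | longestPrefixRepeated
-- ===== SOURCE A (Python) =====
-- def longestPrefixRepeated(s):
--     if len(s) == 0:
--         return ""
--
--     prefix = s[0]
--
--     for i in range(1, len(s)):
--         newPrefix = prefix + s[i]
--         if newPrefix in s[len(newPrefix):]:
--             prefix = newPrefix
--         else:
--             break
--
--     if len(prefix) == 1 and prefix not in s[1:]:
--         return ''
--
--     return prefix
-- ===== SOURCE B (Python) =====
-- def longestPrefixRepeated(s):
--     # The set of prefix lengths k with s[:k] occurring in s[k:] is downward closed,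
--     # so binary-search the largest such k instead of growing the prefix one char at a time.
--     n = len(s)
--     if n == 0:
--         return ""
--     lo, hi = 0, n            # invariant: s[:lo] reappears in s[lo:], s[:hi] does not in s[hi:]
--     while lo + 1 < hi:
--         mid = (lo + hi) // 2
--         if s[:mid] in s[mid:]:
--             lo = mid
--         else:
--             hi = mid
--     return s[:lo]
-- ===== Notes on version B (the rewrite author's own statement) =====
-- stated objective: faster
-- what changed: A grows the prefix one character at a time with a substring-membership test per step; B binary-searches the largest reappearing prefix length (the set of such lengths is downward closed), doing only O(log n) substring tests.
import Mathlib
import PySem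

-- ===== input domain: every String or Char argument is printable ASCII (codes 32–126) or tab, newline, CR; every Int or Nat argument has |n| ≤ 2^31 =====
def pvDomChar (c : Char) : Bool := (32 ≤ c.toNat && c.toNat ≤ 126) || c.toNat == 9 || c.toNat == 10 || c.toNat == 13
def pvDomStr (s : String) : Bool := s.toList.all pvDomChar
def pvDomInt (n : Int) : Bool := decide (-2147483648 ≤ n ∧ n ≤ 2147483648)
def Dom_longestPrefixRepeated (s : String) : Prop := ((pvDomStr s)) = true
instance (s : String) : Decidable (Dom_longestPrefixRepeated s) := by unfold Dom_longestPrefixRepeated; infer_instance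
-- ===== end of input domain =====

-- B replaces A's greedy one-char-at-a-time prefix growth (a substring search per step)
-- by a binary search for the largest reappearing prefix length, which is valid because
-- that set of lengths is downward closed; objective: faster (O(log n) substring tests instead of up to n).

-- ===== PORT A =====
-- the 'for i in range(1, len(s))' loop with its break
def pvALoop (cs : List Char) (i : Nat) (pref : List Char) : List Char :=
  if h : i < cs.length then
    let newPref := pref ++ [cs[i]]
    if PySem.Chars.isIn newPref (PySem.List.slice cs (some (newPref.length : Int)) none) then
      pvALoop cs (i + 1) newPref
    else pref
  else pref
termination_by cs.length - i

def longestPrefixRepeated (s : String) : String :=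
  match s.toList with
  | [] => ""
  | c :: rest =>
    let cs := c :: rest
    let pref := pvALoop cs 1 [c]
    if pref.length == 1 && !(PySem.Chars.isIn pref (PySem.List.slice cs (some (1 : Int)) none)) then ""
    else String.ofList pref

-- ===== PORT B =====
-- the 'while lo + 1 < hi' binary-search loop of Source B
def pvBSearch (cs : List Char) (lo hi : Nat) : Nat :=
  if lo + 1 < hi then
    let mid := (lo + hi) / 2
    if PySem.Chars.isIn (PySem.List.slice cs none (some (mid : Int)))
        (PySem.List.slice cs (some (mid : Int)) none) then
      pvBSearch cs mid hi
    else
      pvBSearch cs lo mid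
  else lo
termination_by hi - lo
decreasing_by all_goals omega

def longestPrefixRepeated_alt (s : String) : String :=
  let cs := s.toList
  let n := cs.length
  if n == 0 then "" else String.ofList (cs.take (pvBSearch cs 0 n))

-- does the prefix of length k reappear in the rest of the string?

-- ===== PRECONDITION & SPEC =====
def Spec_longestPrefixRepeated (s : String) (out : String) : Prop := out = longestPrefixRepeated_alt s
instance (s : String) (out : String) : Decidable (Spec_longestPrefixRepeated s out) := by unfold Spec_longestPrefixRepeated; infer_instance

-- ===== CLAIM (what is proved, stated in full; the proofs are below) =====
def Claim_equal_longestPrefixRepeated : Prop := ∀ (s : String), Dom_longestPrefixRepeated s → Spec_longestPrefixRepeated s (longestPrefixRepeated s)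

-- ===== LEMMAS AND PROOFS =====

def pvOcc (cs : List Char) (k : Nat) : Bool :=
  PySem.Chars.isIn (cs.take k) (cs.drop k)

lemma occ_mono (cs : List Char) (k k' : Nat) (hk : k ≤ k') (h : pvOcc cs k' = true) :
    pvOcc cs k = true := by
  unfold pvOcc at *
  rw [PySem.Chars.isIn_iff_infix] at *
  have h1 : cs.take k <+: cs.take k' := List.take_prefix_take_left hk
  have h2 : cs.drop k' <:+ cs.drop k := by
    have : cs.drop k' = (cs.drop k).drop (k' - k) := by rw [List.drop_drop]; congr 1; omega
    rw [this]; exact List.drop_suffix _ _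
  exact (h1.isInfix.trans h).trans h2.isInfix
lemma bsearch_spec (cs : List Char) (lo hi : Nat) (hlt : lo < hi)
    (hlo : pvOcc cs lo = true) (hhi : pvOcc cs hi = false) :
    pvOcc cs (pvBSearch cs lo hi) = true ∧ pvOcc cs (pvBSearch cs lo hi + 1) = false ∧
      lo ≤ pvBSearch cs lo hi ∧ pvBSearch cs lo hi < hi := by
  rw [pvBSearch]
  by_cases h : lo + 1 < hi
  · rw [if_pos h]
    simp only [PySem.List.slice_to_natCast, PySem.List.slice_from_natCast]
    by_cases hc : pvOcc cs ((lo + hi) / 2) = true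
    · unfold pvOcc at hc
      rw [if_pos hc]
      have := bsearch_spec cs ((lo + hi) / 2) hi (by omega) hc hhi
      exact ⟨this.1, this.2.1, by omega, this.2.2.2⟩
    · rw [if_neg (by unfold pvOcc at hc; simpa using hc)]
      have hc' : pvOcc cs ((lo + hi) / 2) = false := by simpa using hc
      have := bsearch_spec cs lo ((lo + hi) / 2) (by omega) hlo hc'
      exact ⟨this.1, this.2.1, this.2.2.1, by omega⟩
  · rw [if_neg h]
    have heq : hi = lo + 1 := by omega
    exact ⟨hlo, by rw [← heq]; exact hhi, le_rfl, hlt⟩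
termination_by hi - lo
decreasing_by all_goals omega
lemma occ_zero (cs : List Char) : pvOcc cs 0 = true := by
  unfold pvOcc
  simpa using PySem.Chars.isIn_nil cs
lemma occ_len (cs : List Char) (hn : 1 ≤ cs.length) : pvOcc cs cs.length = false := by
  unfold pvOcc
  rw [PySem.Chars.isIn_eq_false_iff]
  simp only [List.take_length, List.drop_length]
  intro hinf
  have := List.eq_nil_of_infix_nil hinf
  simp [this] at hn
lemma occ_iff (cs : List Char) (hn : 1 ≤ cs.length) (j : Nat) :
    pvOcc cs j = true ↔ j ≤ pvBSearch cs 0 cs.length := by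
  obtain ⟨hK, hK1, -, hKn⟩ := bsearch_spec cs 0 cs.length hn (occ_zero cs) (occ_len cs hn)
  constructor
  · intro hj
    by_contra hgt
    have := occ_mono cs (pvBSearch cs 0 cs.length + 1) j (by omega) hj
    rw [hK1] at this
    exact Bool.false_ne_true this
  · intro hj
    exact occ_mono cs j _ hj hK
lemma loop_eq (cs : List Char) (hn : 1 ≤ cs.length) (i : Nat) (h1 : 1 ≤ i)
    (hiL : i ≤ max 1 (pvBSearch cs 0 cs.length)) :
    pvALoop cs i (cs.take i) = cs.take (max 1 (pvBSearch cs 0 cs.length)) := by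
  have hKn : pvBSearch cs 0 cs.length < cs.length :=
    (bsearch_spec cs 0 cs.length hn (occ_zero cs) (occ_len cs hn)).2.2.2
  rw [pvALoop]
  by_cases hin : i < cs.length
  · rw [dif_pos hin]
    have hconcat : cs.take i ++ [cs[i]] = cs.take (i + 1) := List.take_append_getElem hin
    simp only [hconcat]
    have hlen : (cs.take (i + 1)).length = i + 1 := by simp [List.length_take]; omega
    rw [hlen, PySem.List.slice_from_natCast]
    by_cases hc : i + 1 ≤ pvBSearch cs 0 cs.length
    · rw [if_pos (show PySem.Chars.isIn (cs.take (i+1)) (cs.drop (i+1)) = true from (occ_iff cs hn (i+1)).2 hc)]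
      exact loop_eq cs hn (i + 1) (by omega) (by omega)
    · have hocc : ¬ (pvOcc cs (i + 1) = true) := by rw [occ_iff cs hn (i+1)]; omega
      rw [if_neg (by unfold pvOcc at hocc; exact hocc)]
      congr 1
      omega
  · rw [dif_neg hin]
    congr 1
    omega
termination_by (max 1 (pvBSearch cs 0 cs.length)) - i
decreasing_by omega
lemma main_eq (s : String) : longestPrefixRepeated s = longestPrefixRepeated_alt s := by
  unfold longestPrefixRepeated longestPrefixRepeated_alt
  cases h : s.toList with
  | nil => simp
  | cons c rest =>
    simp only
    set cs := c :: rest with hcs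
    have hn : 1 ≤ cs.length := by simp [hcs]
    set K := pvBSearch cs 0 cs.length with hK
    have hKn : K < cs.length :=
      (bsearch_spec cs 0 cs.length hn (occ_zero cs) (occ_len cs hn)).2.2.2
    have hne : (cs.length == 0) = false := by simp [hcs]
    rw [hne]
    simp only [Bool.false_eq_true, if_false]
    have htake1 : cs.take 1 = [c] := by simp [hcs]
    have hloop : pvALoop cs 1 [c] = cs.take (max 1 K) := by
      rw [← htake1]; exact loop_eq cs hn 1 le_rfl (by omega)
    rw [hloop]
    have hlen : (cs.take (max 1 K)).length = max 1 K := by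
      simp [List.length_take]; omega
    have hslice : PySem.List.slice cs (some (1 : Int)) none = cs.drop 1 := by
      simpa using PySem.List.slice_from_natCast cs 1
    rcases Nat.eq_zero_or_pos K with hK0 | hKpos
    · have hL : max 1 K = 1 := by omega
      have hocc : pvOcc cs 1 = false := by
        rw [Bool.eq_false_iff, Ne, occ_iff cs hn 1]; omega
      unfold pvOcc at hocc
      rw [hL] at hlen ⊢
      rw [if_pos]
      · rw [hK0]; simp
      · rw [hslice, hlen]
        simp only [List.drop_one] at hocc
        simp [hocc]
    · have hLM : max 1 K = K := by omega
      rw [hLM] at hlen ⊢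
      rcases Nat.lt_or_ge 1 K with hM2 | hM1
      · rw [if_neg]
        rw [hlen]
        simp
        omega
      · have hM1' : K = 1 := by omega
        have hocc : pvOcc cs 1 = true := by rw [occ_iff cs hn 1]; omega
        unfold pvOcc at hocc
        rw [if_neg]
        rw [hslice, hlen, hM1']
        simp only [List.drop_one] at hocc
        simp [hocc]

-- ===== VERDICT (by name: the statement is the Claim_ definition above) =====
theorem longestPrefixRepeated_spec : Claim_equal_longestPrefixRepeated := by
  intro s _
  unfold Spec_longestPrefixRepeated
  exact main_eq s
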